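-- pv_equiv track=rewrite | github.com/mva730/exercises-python | exercises/hackerrank/strings/strings_similarity/strings_similarity_Z-func.py | string_similarity2
-- ===== SOURCE A (Python) =====
-- def string_similarity2(s):
--     result = length = len(s)
--     right = 0
--     left = 0
--     z = [length]
--
--     for i in range(1, length):
--         z.append(0)
--         if i <= right:
--             z[i] = min(right - i + 1, z[i - left])
--         while i + z[i] < length and s[z[i]] == s[i + z[i]]:
--             z[i] += 1
--         if i + z[i] - 1 > right:
--             left = i
--             right = i + z[i] - 1
--
--         result += z[i]
--
--     return result
-- ===== SOURCE B (Python) =====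
-- def string_similarity2(s):
--     n = len(s)
--     result = 0
--     for i in range(n):
--         k = 0
--         while i + k < n and s[k] == s[i + k]:
--             k += 1
--         result += k
--     return result
-- ===== Notes on version B (the rewrite author's own statement) =====
-- stated objective: simpler
-- what changed: Replaces the Z-algorithm's left/right window and z-array bookkeeping with a direct double loop that recomputes each longest-common-prefix naively and sums it.
import Mathlib
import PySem

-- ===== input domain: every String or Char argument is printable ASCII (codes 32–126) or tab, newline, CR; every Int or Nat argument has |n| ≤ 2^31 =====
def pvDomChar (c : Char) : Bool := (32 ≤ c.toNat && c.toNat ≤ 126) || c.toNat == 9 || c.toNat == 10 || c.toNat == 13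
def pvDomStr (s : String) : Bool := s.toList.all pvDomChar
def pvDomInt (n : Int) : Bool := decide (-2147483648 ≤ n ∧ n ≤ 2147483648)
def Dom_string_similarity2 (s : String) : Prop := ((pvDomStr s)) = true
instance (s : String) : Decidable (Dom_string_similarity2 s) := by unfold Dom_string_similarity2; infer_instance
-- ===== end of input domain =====

-- B replaces A's Z-algorithm (left/right window + z-array) by the naive double loop
-- summing each longest common prefix directly: simpler, no bookkeeping (not faster).

-- ===== PORT A =====
-- A's inner while loop 'while i + z[i] < length and s[z[i]] == s[i + z[i]]: z[i] += 1',
-- fuel-bounded; fuel = len(s)+1 always suffices since i + z[i] grows toward length.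
-- pyGetD with default ' ' is exact here: the bounds check precedes each access.
def pvAExtend (cs : List Char) (n i : Int) (zi : Int) : Nat → Int
  | 0 => zi
  | fuel + 1 =>
    if i + zi < n ∧ PySem.List.pyGetD cs zi ' ' = PySem.List.pyGetD cs (i + zi) ' ' then
      pvAExtend cs n i (zi + 1) fuel
    else zi

-- one iteration of A's for-loop; state = (result, right, left, z)
def pvAStep (cs : List Char) (n : Int) (st : Int × Int × Int × List Int) (i : Int) :
    Int × Int × Int × List Int :=
  let result := st.1
  let right := st.2.1
  let left := st.2.2.1
  let z := st.2.2.2 ++ [0]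
  let zi := if i ≤ right then min (right - i + 1) (PySem.List.pyGetD z (i - left) 0)
            else PySem.List.pyGetD z i 0
  let zi := pvAExtend cs n i zi (cs.length + 1)
  let z := PySem.List.pySetD z i zi
  if i + zi - 1 > right then (result + zi, i + zi - 1, i, z)
  else (result + zi, right, left, z)

def string_similarity2 (s : String) : Int :=
  let cs := s.toList
  let length : Int := cs.length
  ((PySem.List.pyRange 1 length 1).foldl (pvAStep cs length)
    (length, 0, 0, [length])).1

-- ===== PORT B =====
-- B's inner while loop 'while i + k < n and s[k] == s[i + k]: k += 1' (same fuel remark).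
def pvMatchLen (cs : List Char) (n i : Int) (k : Int) : Nat → Int
  | 0 => k
  | fuel + 1 =>
    if i + k < n ∧ PySem.List.pyGetD cs k ' ' = PySem.List.pyGetD cs (i + k) ' ' then
      pvMatchLen cs n i (k + 1) fuel
    else k

def string_similarity2_alt (s : String) : Int :=
  let cs := s.toList
  let n : Int := cs.length
  (PySem.List.pyRange 0 n 1).foldl
    (fun result i => result + pvMatchLen cs n i 0 (cs.length + 1)) 0

-- ===== PRECONDITION & SPEC =====
def Spec_string_similarity2 (s : String) (out : Int) : Prop := out = string_similarity2_alt s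
instance (s : String) (out : Int) : Decidable (Spec_string_similarity2 s out) := by unfold Spec_string_similarity2; infer_instance

-- ===== CLAIM (what is proved, stated in full; the proofs are below) =====
def Claim_equal_string_similarity2 : Prop := ∀ (s : String), Dom_string_similarity2 s → Spec_string_similarity2 s (string_similarity2 s)

-- ===== LEMMAS AND PROOFS =====

-- length of the common prefix of two lists
def lcpL : List Char → List Char → Nat
  | a :: as, b :: bs => if a = b then lcpL as bs + 1 else 0
  | _, _ => 0

-- Z-function value: longest common prefix of cs and cs.drop i
def Zf (cs : List Char) (i : Nat) : Nat := lcpL cs (cs.drop i)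

theorem lcpL_le_right : ∀ (xs ys : List Char), lcpL xs ys ≤ ys.length := by
  intro xs
  induction xs with
  | nil => intro ys; cases ys <;> simp [lcpL]
  | cons a as ih =>
    intro ys
    cases ys with
    | nil => simp [lcpL]
    | cons b bs =>
      simp only [lcpL]
      split
      · have := ih bs; simp; omega
      · simp

theorem lcpL_self : ∀ (xs : List Char), lcpL xs xs = xs.length := by
  intro xs
  induction xs with
  | nil => simp [lcpL]
  | cons a as ih => simp [lcpL, ih]

theorem lcpL_getD (d : Char) :
    ∀ (xs ys : List Char) (t : Nat), t < lcpL xs ys → xs.getD t d = ys.getD t d := by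
  intro xs
  induction xs with
  | nil => intro ys t h; cases ys <;> simp [lcpL] at h
  | cons a as ih =>
    intro ys t h
    cases ys with
    | nil => simp [lcpL] at h
    | cons b bs =>
      simp only [lcpL] at h
      by_cases hab : a = b
      · rw [if_pos hab] at h
        cases t with
        | zero => simpa using hab
        | succ t' => simpa using ih bs t' (by omega)
      · rw [if_neg hab] at h; omega

theorem lcpL_mismatch (d : Char) :
    ∀ (xs ys : List Char), lcpL xs ys < xs.length → lcpL xs ys < ys.length →
      xs.getD (lcpL xs ys) d ≠ ys.getD (lcpL xs ys) d := by
  intro xs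
  induction xs with
  | nil => intro ys h1 _; simp at h1
  | cons a as ih =>
    intro ys h1 h2
    cases ys with
    | nil => simp at h2
    | cons b bs =>
      by_cases hab : a = b
      · simp only [lcpL, if_pos hab, List.length_cons] at h1 h2 ⊢
        simpa using ih bs (by omega) (by omega)
      · simp only [lcpL, if_neg hab, List.length_cons] at h1 h2 ⊢
        simpa using hab

theorem lcpL_ge (d : Char) :
    ∀ (xs ys : List Char) (v : Nat),
      (∀ t, t < v → t < xs.length ∧ t < ys.length ∧ xs.getD t d = ys.getD t d) →
      v ≤ lcpL xs ys := by
  intro xs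
  induction xs with
  | nil =>
    intro ys v h
    cases v with
    | zero => omega
    | succ w => have := (h 0 (by omega)).1; simp at this
  | cons a as ih =>
    intro ys v h
    cases v with
    | zero => omega
    | succ w =>
      cases ys with
      | nil => have := (h 0 (by omega)).2.1; simp at this
      | cons b bs =>
        have h0 := (h 0 (by omega)).2.2
        simp at h0
        have hw : w ≤ lcpL as bs := by
          apply ih bs w
          intro t ht
          have := h (t + 1) (by omega)
          constructor
          · simpa using this.1
          constructor
          · simpa using this.2.1
          · simpa using this.2.2
        simp only [lcpL, if_pos h0]
        omega

theorem getD_drop (cs : List Char) (i t : Nat) (d : Char) :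
    (cs.drop i).getD t d = cs.getD (i + t) d := by
  simp [List.getD, List.getElem?_drop]

theorem Zf_getD (cs : List Char) (i t : Nat) (d : Char) (h : t < Zf cs i) :
    cs.getD t d = cs.getD (i + t) d := by
  have := lcpL_getD d cs (cs.drop i) t h
  rwa [getD_drop] at this

theorem Zf_lt_length (cs : List Char) (i t : Nat) (h : t < Zf cs i) : i + t < cs.length := by
  have h2 := lcpL_le_right cs (cs.drop i)
  simp [List.length_drop] at h2
  unfold Zf at h
  omega

theorem Zf_ge (cs : List Char) (i : Nat) (v : Nat)
    (h : ∀ t, t < v → i + t < cs.length ∧ cs.getD t ' ' = cs.getD (i + t) ' ') :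
    v ≤ Zf cs i := by
  apply lcpL_ge ' '
  intro t ht
  have := h t ht
  refine ⟨by omega, by simp [List.length_drop]; omega, ?_⟩
  rw [getD_drop]
  exact this.2

-- the fuel-bounded while loop computes exactly the Z-value when started below it
theorem pvAExtend_eq (cs : List Char) (i : Nat) :
    ∀ (fuel zi : Nat), zi ≤ Zf cs i → Zf cs i < zi + fuel →
      pvAExtend cs (cs.length : Int) (i : Int) (zi : Int) fuel = (Zf cs i : Int) := by
  intro fuel
  induction fuel with
  | zero => intro zi h1 h2; omega
  | succ fuel ih =>
    intro zi h1 h2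
    have hcast : (i : Int) + (zi : Int) = ((i + zi : Nat) : Int) := by push_cast; ring
    by_cases hlt : zi < Zf cs i
    · have hrange : i + zi < cs.length := Zf_lt_length cs i zi hlt
      have heq : cs.getD zi ' ' = cs.getD (i + zi) ' ' := Zf_getD cs i zi ' ' hlt
      have hcond : ((i : Int) + (zi : Int) < (cs.length : Int)) ∧
          PySem.List.pyGetD cs (zi : Int) ' ' = PySem.List.pyGetD cs ((i : Int) + (zi : Int)) ' ' := by
        refine ⟨by omega, ?_⟩
        rw [hcast]
        simp only [PySem.List.pyGetD_natCast]
        exact heq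
      simp only [pvAExtend]
      rw [if_pos hcond]
      have hc1 : ((zi : Int) + 1) = ((zi + 1 : Nat) : Int) := by push_cast; ring
      rw [hc1]
      exact ih (zi + 1) (by omega) (by omega)
    · have hz : zi = Zf cs i := by omega
      have hzl : zi = lcpL cs (cs.drop i) := hz
      have hcond : ¬ (((i : Int) + (zi : Int) < (cs.length : Int)) ∧
          PySem.List.pyGetD cs (zi : Int) ' ' = PySem.List.pyGetD cs ((i : Int) + (zi : Int)) ' ') := by
        rintro ⟨hc1, hc2⟩
        have hir : i + zi < cs.length := by omega
        have hd2 : lcpL cs (cs.drop i) < (cs.drop i).length := by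
          simp only [List.length_drop]; omega
        have hm := lcpL_mismatch ' ' cs (cs.drop i) (by omega) hd2
        rw [getD_drop] at hm
        rw [← hzl] at hm
        rw [hcast] at hc2
        simp only [PySem.List.pyGetD_natCast] at hc2
        exact hm hc2
      simp only [pvAExtend]
      rw [if_neg hcond, hz]

-- B's while loop is the same loop
theorem pvMatchLen_eq_pvAExtend (cs : List Char) (n i : Int) :
    ∀ (fuel : Nat) (k : Int), pvMatchLen cs n i k fuel = pvAExtend cs n i k fuel := by
  intro fuel
  induction fuel with
  | zero => intro k; rfl
  | succ fuel ih =>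
    intro k
    simp only [pvMatchLen, pvAExtend]
    split
    · exact ih (k + 1)
    · rfl

-- B computes the sum of all Z-values
theorem alt_eq_sum (s : String) :
    string_similarity2_alt s
      = ((List.range s.toList.length).map (fun j => (Zf s.toList j : Int))).sum := by
  unfold string_similarity2_alt
  rw [PySem.List.foldl_add]
  rw [PySem.List.pyRange_zero_nat]
  rw [List.map_map]
  rw [zero_add]
  congr 1
  apply List.map_congr_left
  intro k hk
  simp only [Function.comp]
  rw [pvMatchLen_eq_pvAExtend]
  have : (0 : Int) = ((0 : Nat) : Int) := rfl
  rw [this, pvAExtend_eq s.toList k (s.toList.length + 1) 0 (by omega) ?_]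
  have h1 := lcpL_le_right s.toList (s.toList.drop k)
  simp [List.length_drop] at h1
  have hb : s.toList.length = s.length := by simp
  unfold Zf
  omega

-- invariant of A's fold: state = (result, right, left, z) after iterations 1..i-1
def AInv (cs : List Char) (i : Nat) (st : Int × Int × Int × List Int) : Prop :=
  ∃ ln rn : Nat,
    st.2.1 = (rn : Int) ∧ st.2.2.1 = (ln : Int) ∧
    st.1 = ((List.range i).map (fun j => (Zf cs j : Int))).sum ∧
    st.2.2.2.length = i ∧
    (∀ j, j < i → st.2.2.2.getD j 0 = (Zf cs j : Int)) ∧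
    ln < i ∧ rn < cs.length ∧
    (∀ t : Nat, ln + t ≤ rn → cs.getD (ln + t) ' ' = cs.getD t ' ')

theorem AStep_inv (cs : List Char) (i : Nat) (h1 : 1 ≤ i) (hi : i < cs.length)
    (st : Int × Int × Int × List Int) (h : AInv cs i st) :
    AInv cs (i + 1) (pvAStep cs (cs.length : Int) st (i : Int)) := by
  obtain ⟨ln, rn, hr, hl, hres, hlen, hz, hlni, hrn, hbox⟩ := h
  obtain ⟨res, right, left, z⟩ := st
  simp only at hr hl hres hlen hz
  subst hr hl
  -- the value read before the while loop
  set z' := z ++ [0] with hz'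
  have hlen' : z'.length = i + 1 := by simp [hz', hlen]
  have hz'get : ∀ j, j < i → z'.getD j 0 = (Zf cs j : Int) := by
    intro j hj
    rw [hz']
    rw [List.getD, List.getElem?_append_left (by omega)]
    exact hz j hj
  have hz'i : z'.getD i 0 = 0 := by
    rw [hz', List.getD, List.getElem?_append_right (by omega), hlen]
    simp
  -- initial value v of z[i]
  set v : Int := if (i : Int) ≤ (rn : Int) then
      min ((rn : Int) - i + 1) (PySem.List.pyGetD z' ((i : Int) - (ln : Int)) 0)
    else PySem.List.pyGetD z' (i : Int) 0 with hv
  -- 0 ≤ v and v ≤ Zf cs i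
  have hil : (i : Int) - (ln : Int) = ((i - ln : Nat) : Int) := by omega
  have hvgd : ∃ vn : Nat, v = (vn : Int) ∧ vn ≤ Zf cs i := by
    by_cases hir : (i : Int) ≤ (rn : Int)
    · rw [hv, if_pos hir]
      by_cases hl0 : ln = 0
      · -- left = 0: reads the freshly appended 0, min is 0
        have : (i : Int) - (ln : Int) = ((i : Nat) : Int) := by omega
        rw [this, PySem.List.pyGetD_natCast, hz'i]
        refine ⟨0, ?_, by omega⟩
        have : (0 : Int) ≤ (rn : Int) - i + 1 := by omega
        omega
      · -- genuine Z-box case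
        have hlt : i - ln < i := by omega
        rw [hil, PySem.List.pyGetD_natCast, hz'get (i - ln) hlt]
        set w : Nat := min (rn - i + 1) (Zf cs (i - ln)) with hw
        refine ⟨w, ?_, ?_⟩
        · rw [hw]; push_cast; omega
        · apply Zf_ge
          intro t ht
          have ht1 : t < Zf cs (i - ln) := by omega
          have ht2 : i + t ≤ rn := by omega
          have e1 : cs.getD t ' ' = cs.getD ((i - ln) + t) ' ' := Zf_getD cs (i - ln) t ' ' ht1
          have e2 : cs.getD (ln + ((i - ln) + t)) ' ' = cs.getD ((i - ln) + t) ' ' :=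
            hbox ((i - ln) + t) (by omega)
          have e3 : ln + ((i - ln) + t) = i + t := by omega
          rw [e3] at e2
          exact ⟨by omega, by rw [e1, ← e2]⟩
    · rw [hv, if_neg hir, PySem.List.pyGetD_natCast, hz'i]
      exact ⟨0, rfl, by omega⟩
  obtain ⟨vn, hvn, hvle⟩ := hvgd
  -- after the while loop z[i] = Zf cs i
  have hext : pvAExtend cs (cs.length : Int) (i : Int) v (cs.length + 1) = (Zf cs i : Int) := by
    rw [hvn]
    apply pvAExtend_eq cs i (cs.length + 1) vn hvle
    have h2 := lcpL_le_right cs (cs.drop i)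
    simp [List.length_drop] at h2
    unfold Zf
    omega
  set L : Nat := Zf cs i with hL
  have hLlen : i + L ≤ cs.length := by
    have h2 := lcpL_le_right cs (cs.drop i)
    simp [List.length_drop] at h2
    rw [hL]; unfold Zf; omega
  -- the updated z list
  have hset : PySem.List.pySetD z' (i : Int) (L : Int) = z'.set i (L : Int) :=
    PySem.List.pySetD_natCast z' i (L : Int)
  have hzset_len : (z'.set i (L : Int)).length = i + 1 := by simp [hlen']
  have hzset : ∀ j, j < i + 1 → (z'.set i (L : Int)).getD j 0 = (Zf cs j : Int) := by
    intro j hj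
    by_cases hji : j = i
    · subst hji
      rw [List.getD, List.getElem?_set_self (by omega)]
      simp [hL]
    · rw [List.getD, List.getElem?_set_ne (by omega)]
      exact hz'get j (by omega)
  have hsum : res + (L : Int)
      = ((List.range (i + 1)).map (fun j => (Zf cs j : Int))).sum := by
    rw [hres, List.range_succ, List.map_append, List.sum_append]
    simp [hL]
  -- case split on the window update
  simp only [pvAStep]
  rw [← hv]
  rw [hext, hset]
  by_cases hupd : (i : Int) + (L : Int) - 1 > (rn : Int)
  · rw [if_pos hupd]
    refine ⟨i, i + L - 1, ?_, rfl, hsum, hzset_len, hzset, by omega, by omega, ?_⟩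
    · simp only
      omega
    · intro t ht
      have htL : t < L := by omega
      have := Zf_getD cs i t ' ' (by rw [hL] at htL; exact htL)
      rw [this]
  · rw [if_neg hupd]
    exact ⟨ln, rn, rfl, rfl, hsum, hzset_len, hzset, by omega, hrn, hbox⟩

theorem A_loop (cs : List Char) :
    ∀ (m : Nat), 1 ≤ m → m ≤ cs.length →
      AInv cs m ((PySem.List.pyRange 1 (m : Int) 1).foldl
        (pvAStep cs (cs.length : Int)) ((cs.length : Int), 0, 0, [(cs.length : Int)])) := by
  intro m
  induction m with
  | zero => omega
  | succ m ih =>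
    intro _ hm
    by_cases hm1 : m = 0
    · subst hm1
      rw [PySem.List.pyRange_one_eq_nil (by norm_num)]
      refine ⟨0, 0, rfl, rfl, ?_, rfl, ?_, by omega, by omega, ?_⟩
      · simp [Zf, lcpL_self]
      · intro j hj
        have : j = 0 := by omega
        subst this
        simp [Zf, lcpL_self, List.getD]
      · intro t ht
        have : t = 0 := by omega
        subst this
        rfl
    · have hcast : ((m + 1 : Nat) : Int) = (m : Int) + 1 := by push_cast; ring
      rw [hcast, PySem.List.pyRange_one_succ_right (by exact_mod_cast Nat.one_le_iff_ne_zero.mpr hm1)]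
      rw [List.foldl_append]
      simp only [List.foldl]
      exact AStep_inv cs m (by omega) (by omega) _ (ih (by omega) (by omega))

-- ===== VERDICT (by name: the statement is the Claim_ definition above) =====
theorem string_similarity2_spec : Claim_equal_string_similarity2 := by
  intro s _
  unfold Spec_string_similarity2
  rw [alt_eq_sum]
  unfold string_similarity2
  by_cases h0 : s.toList.length = 0
  · have e : PySem.List.pyRange 1 (s.toList.length : Int) 1 = [] :=
      PySem.List.pyRange_one_eq_nil (by rw [h0]; norm_num)
    show ((PySem.List.pyRange 1 (s.toList.length : Int) 1).foldl
        (pvAStep s.toList (s.toList.length : Int))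
        ((s.toList.length : Int), 0, 0, [(s.toList.length : Int)])).1
      = ((List.range s.toList.length).map (fun j => (Zf s.toList j : Int))).sum
    rw [e, h0]
    simp
  · have := A_loop s.toList s.toList.length (by omega) (le_refl _)
    obtain ⟨ln, rn, _, _, hres, _⟩ := this
    exact hres
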